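-- pv_equiv track=rewrite | github.com/Sakyi-Ken/DSA-Journey | code-signal/Lesson-1/lesson4.py | find_unique_string
-- ===== SOURCE A (Python) =====
-- def find_unique_string(words):
--   ''' list -> (str)
--   This function finds the first unique string in a list of words.
--   '''
--   seen = set()
--   duplicates = set()
--
--   for word in words:
--     if word in seen:
--       duplicates.add(word)
--     seen.add(word)
--
--   for word in words:
--     if word not in duplicates:
--       return word
--
--   return None
-- ===== SOURCE B (Python) =====
-- def find_unique_string(words):
--   # Single pass: keep an insertion-ordered dict of still-unique candidates;
--   # a repeated word is evicted. The answer is the first surviving candidate,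
--   # so no second scan over `words` is needed.
--   candidates = {}
--   seen = set()
--   for word in words:
--     if word in seen:
--       candidates.pop(word, None)
--     else:
--       seen.add(word)
--       candidates[word] = None
--   for word in candidates:
--     return word
--   return None
-- ===== Notes on version B (the rewrite author's own statement) =====
-- stated objective: alternative
-- what changed: Replaces A's two scans over words (build a duplicates set, then rescan the whole list) with one pass that maintains an insertion-ordered dict of still-unique candidates, evicting a word when it repeats; the result is the first surviving candidate, read off the dict instead of a second scan over words.
import Mathlib
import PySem

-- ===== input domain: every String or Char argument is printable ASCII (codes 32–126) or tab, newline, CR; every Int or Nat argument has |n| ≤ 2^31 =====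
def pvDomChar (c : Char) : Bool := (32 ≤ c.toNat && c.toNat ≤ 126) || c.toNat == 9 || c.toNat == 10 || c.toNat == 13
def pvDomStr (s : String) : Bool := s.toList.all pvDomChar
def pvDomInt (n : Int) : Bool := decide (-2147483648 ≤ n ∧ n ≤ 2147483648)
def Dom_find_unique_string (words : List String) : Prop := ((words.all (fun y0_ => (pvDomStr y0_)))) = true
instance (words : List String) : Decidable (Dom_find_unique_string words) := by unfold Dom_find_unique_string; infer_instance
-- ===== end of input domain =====

-- B replaces A's two scans over the word list (duplicates set, then a full rescan) by a
-- single pass keeping an insertion-ordered dict of still-unique candidates; the answer is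
-- the first surviving candidate (alternative decomposition; same O(n) cost).


-- ===== PORT A =====
-- first loop: state (seen, duplicates); 'if word in seen: duplicates.add(word)', then 'seen.add(word)'
-- second loop: 'for word in words: if word not in duplicates: return word'; 'return None'
def find_unique_string (words : List String) : Option String :=
  let st := words.foldl
    (fun (p : PySem.Set String × PySem.Set String) word =>
      (PySem.Set.add p.1 word,
       if PySem.Set.contains p.1 word then PySem.Set.add p.2 word else p.2))
    (PySem.Set.empty, PySem.Set.empty)
  words.find? (fun word => !(PySem.Set.contains st.2 word))

-- ===== PORT B =====
-- one pass: 'if word in seen: candidates.pop(word, None) else: seen.add(word); candidates[word] = None'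
-- ('pop(word, None)' discards the value: ported as Dict.erase); then 'for word in candidates: return word'
-- returns the dict's first key, 'return None' otherwise: keys.head?
def find_unique_string_alt (words : List String) : Option String :=
  let st := words.foldl
    (fun (p : PySem.Dict String Unit × PySem.Set String) word =>
      if PySem.Set.contains p.2 word then (p.1.erase word, p.2)
      else (p.1.insert word (), PySem.Set.add p.2 word))
    (PySem.Dict.empty, PySem.Set.empty)
  st.1.keys.head?

-- ===== PRECONDITION & SPEC =====
def Spec_find_unique_string (words : List String) (out : Option String) : Prop := out = find_unique_string_alt words
instance (words : List String) (out : Option String) : Decidable (Spec_find_unique_string words out) := by unfold Spec_find_unique_string; infer_instance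

-- ===== CLAIM (what is proved, stated in full; the proofs are below) =====
def Claim_equal_find_unique_string : Prop := ∀ (words : List String), Dom_find_unique_string words → Spec_find_unique_string words (find_unique_string words)

-- ===== LEMMAS AND PROOFS =====

-- after A's first loop, membership in the accumulated duplicates set, for any start state
theorem fus_fold_mem (l : List String) (seen dups : PySem.Set String) (w : String) :
    (PySem.Set.contains (l.foldl
      (fun (p : PySem.Set String × PySem.Set String) word =>
        (PySem.Set.add p.1 word,
         if PySem.Set.contains p.1 word then PySem.Set.add p.2 word else p.2))
      (seen, dups)).2 w = true
     ↔ (w ∈ dups ∨ (w ∈ seen ∧ w ∈ l) ∨ 2 ≤ l.count w)) := by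
  induction l generalizing seen dups with
  | nil => simp
  | cons x t ih =>
    simp only [List.foldl_cons]
    have hwt := List.count_pos_iff (a := w) (l := t)
    by_cases hwx : w = x
    · subst hwx
      by_cases hsx : w ∈ seen
      · rw [if_pos ((PySem.Set.contains_iff _ _).mpr hsx)]
        rw [ih]
        simp [PySem.Set.mem_add, hsx]
      · rw [if_neg (by simp [hsx])]
        rw [ih]
        simp [hsx]
        by_cases hm : w ∈ t
        · have := hwt.mpr hm
          simp [hm]
        · have : t.count w = 0 := by
            rcases Nat.eq_zero_or_pos (t.count w) with h | h
            · exact h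
            · exact absurd (hwt.mp h) hm
          simp [hm, this]
    · have hc : (x :: t).count w = t.count w := by
        simp [Ne.symm hwx]
      by_cases hsx : x ∈ seen
      · rw [if_pos ((PySem.Set.contains_iff _ _).mpr hsx)]
        rw [ih]
        simp [PySem.Set.mem_add, hwx, hc]
      · rw [if_neg (by simp [hsx])]
        rw [ih]
        simp [PySem.Set.mem_add, hwx, hc]

theorem fus_find_congr (p q : String → Bool) (l : List String)
    (h : ∀ x ∈ l, p x = q x) : l.find? p = l.find? q := by
  induction l with
  | nil => rfl
  | cons x t ih =>
    have hx := h x (by simp)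
    simp only [List.find?_cons, hx]
    cases q x
    · exact ih (fun y hy => h y (by simp [hy]))
    · rfl

theorem fus_find_eq_head_filter (p : String → Bool) (l : List String) :
    l.find? p = (l.filter p).head? := by
  induction l with
  | nil => rfl
  | cons x t ih =>
    simp only [List.find?_cons, List.filter_cons]
    cases hx : p x
    · exact ih
    · rfl

-- B's single pass, characterised: after folding pre (from the matching state), the
-- candidates dict holds exactly the words occurring once in pre, in order, and seen = set(pre)
theorem fus_B_fold (l : List String) : ∀ pre : List String,
    l.foldl
      (fun (p : PySem.Dict String Unit × PySem.Set String) word =>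
        if PySem.Set.contains p.2 word then (p.1.erase word, p.2)
        else (p.1.insert word (), PySem.Set.add p.2 word))
      (⟨(pre.filter (fun w => pre.count w == 1)).map (fun w => (w, ()))⟩, PySem.Set.ofList pre)
    = (⟨((pre ++ l).filter (fun w => (pre ++ l).count w == 1)).map (fun w => (w, ()))⟩,
       PySem.Set.ofList (pre ++ l)) := by
  induction l with
  | nil => intro pre; simp
  | cons x t ih =>
    intro pre
    simp only [List.foldl_cons]
    have hassoc : pre ++ x :: t = (pre ++ [x]) ++ t := by simp
    rw [hassoc]
    by_cases hx : x ∈ pre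
    · rw [if_pos (by simp [PySem.Set.mem_ofList, hx])]
      have hset : PySem.Set.ofList pre = PySem.Set.ofList (pre ++ [x]) := by
        rw [PySem.Set.ofList_append_singleton,
            PySem.Set.add_of_mem (by simp [PySem.Set.mem_ofList, hx])]
      have hlist : ((pre ++ [x]).filter (fun w => (pre ++ [x]).count w == 1))
          = (pre.filter (fun w => pre.count w == 1)).filter (fun w => !(w == x)) := by
        rw [List.filter_append, List.filter_filter]
        have hxc : 2 ≤ (pre ++ [x]).count x := by
          have : 1 ≤ pre.count x := List.count_pos_iff.mpr hx
          simp [List.count_append]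
          omega
        have h1 : [x].filter (fun w => (pre ++ [x]).count w == 1) = [] := by
          simp only [List.filter_cons, List.filter_nil]
          rw [if_neg]
          simp only [beq_iff_eq]
          omega
        rw [h1, List.append_nil]
        apply List.filter_congr
        intro w hw
        by_cases hwx : w = x
        · subst hwx
          have h2 : 1 ≤ pre.count w := List.count_pos_iff.mpr hw
          simp [List.count_append]
          omega
        · simp [List.count_append, hwx, Ne.symm hwx]
      have hdict :
          (PySem.Dict.mk ((pre.filter (fun w => pre.count w == 1)).map (fun w => (w, ())))).erase x
          = ⟨((pre ++ [x]).filter (fun w => (pre ++ [x]).count w == 1)).map (fun w => (w, ()))⟩ := by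
        simp only [PySem.Dict.erase]
        congr 1
        rw [List.filter_map]
        have hcomp : ((fun (p : String × Unit) => !(p.1 == x)) ∘ fun w => (w, ())) = fun w => !(w == x) := rfl
        rw [hcomp, hlist]
      rw [hset, hdict]
      exact ih (pre ++ [x])
    · rw [if_neg (by simp [PySem.Set.mem_ofList, hx])]
      have hset : PySem.Set.add (PySem.Set.ofList pre) x = PySem.Set.ofList (pre ++ [x]) :=
        (PySem.Set.ofList_append_singleton pre x).symm
      have hnc : (PySem.Dict.mk ((pre.filter (fun w => pre.count w == 1)).map
          (fun w => (w, ())))).contains x = false := by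
        rw [PySem.Dict.contains_eq_decide_mem_keys]
        simp only [PySem.Dict.keys_mk, List.map_map]
        simp only [decide_eq_false_iff_not]
        intro hmem
        rcases List.mem_map.mp hmem with ⟨w, hw, hww⟩
        exact hx (by simpa [← hww] using List.mem_of_mem_filter hw)
      have hdict :
          (PySem.Dict.mk ((pre.filter (fun w => pre.count w == 1)).map (fun w => (w, ())))).insert x ()
          = ⟨((pre ++ [x]).filter (fun w => (pre ++ [x]).count w == 1)).map (fun w => (w, ()))⟩ := by
        have hfil : (pre ++ [x]).filter (fun w => (pre ++ [x]).count w == 1)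
             = pre.filter (fun w => pre.count w == 1) ++ [x] := by
          rw [List.filter_append]
          have h1 : [x].filter (fun w => (pre ++ [x]).count w == 1) = [x] := by
            have : pre.count x = 0 := List.count_eq_zero.mpr hx
            simp only [List.filter_cons, List.filter_nil]
            rw [if_pos]
            simp [List.count_append, this]
          have h2 : pre.filter (fun w => (pre ++ [x]).count w == 1)
               = pre.filter (fun w => pre.count w == 1) := by
            apply List.filter_congr
            intro w hw
            have hwx : w ≠ x := fun h => hx (h ▸ hw)
            simp [List.count_append, Ne.symm hwx]
          rw [h1, h2]
        rw [PySem.Dict.ext_iff, PySem.Dict.items_insert_of_not_contains]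
        · rw [hfil, List.map_append]
          rfl
        · exact hnc
      rw [hset, hdict]
      exact ih (pre ++ [x])

-- ===== VERDICT (by name: the statement is the Claim_ definition above) =====
theorem find_unique_string_spec : Claim_equal_find_unique_string := by
  intro words _
  unfold Spec_find_unique_string find_unique_string find_unique_string_alt
  have hB := fus_B_fold words []
  simp only [List.nil_append] at hB
  have hB' : words.foldl
      (fun (p : PySem.Dict String Unit × PySem.Set String) word =>
        if PySem.Set.contains p.2 word then (p.1.erase word, p.2)
        else (p.1.insert word (), PySem.Set.add p.2 word))
      (PySem.Dict.empty, PySem.Set.empty)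
    = (⟨(words.filter (fun w => words.count w == 1)).map (fun w => (w, ()))⟩,
       PySem.Set.ofList words) := hB
  simp only [hB']
  simp only [PySem.Dict.keys_mk, List.map_map]
  have hcomp : (Prod.fst ∘ fun (w : String) => (w, ())) = (id : String → String) := rfl
  rw [hcomp, List.map_id, ← fus_find_eq_head_filter]
  apply fus_find_congr
  intro w hw
  have h1 : 1 ≤ words.count w := List.count_pos_iff.mpr hw
  have hmem := fus_fold_mem words PySem.Set.empty PySem.Set.empty w
  rcases Or.symm (Bool.eq_false_or_eq_true (PySem.Set.contains (words.foldl
      (fun (p : PySem.Set String × PySem.Set String) word =>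
        (PySem.Set.add p.1 word,
         if PySem.Set.contains p.1 word then PySem.Set.add p.2 word else p.2))
      (PySem.Set.empty, PySem.Set.empty)).2 w)) with hb | hb
  · have h2 : ¬ 2 ≤ words.count w := fun hc => by
      have := hmem.mpr (Or.inr (Or.inr hc))
      rw [hb] at this
      exact Bool.false_ne_true this
    rw [hb]
    simp
    omega
  · have h2 : 2 ≤ words.count w := by
      rcases hmem.mp hb with h | h | h
      · exact absurd h (by simp [PySem.Set.empty])
      · exact absurd h.1 (by simp [PySem.Set.empty])
      · exact h
    rw [hb]
    simp
    omega
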